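-- pv_equiv track=rewrite | github.com/Schroters/Learning-project | Codewars/Last Survivors Ep.3.py | last_survivors
-- ===== SOURCE A (Python) =====
-- def last_survivors(arr, nums):
--     arr_separate = list(map(lambda x: list(x), arr))
--     result = ''
--     for i in reversed(range(len(arr))):
--         for j in range(len(arr[0])):
--             if arr_separate[i][j] != " ":   # если не пусто
--                 if nums[j] != 0:            # если нет нуля
--                     nums[j] -= 1            # вычитаем значение
--                     arr_separate[i][j] = None   # убираем букву
--             if arr_separate[i][j] != None and arr_separate[i][j] != " ":
--                 result += str(arr_separate[i][j])   # все наше добовляем в строку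
--
--     return result
-- ===== SOURCE B (Python) =====
-- def last_survivors(arr, nums):
--     height = len(arr)
--     width = len(arr[0]) if arr else 0
--     removed = set()
--     for j in range(width):
--         col = [i for i in range(height - 1, -1, -1) if arr[i][j] != " "]
--         if col:
--             quota = nums[j]
--             for i in col:
--                 if quota == 0:
--                     break
--                 removed.add((i, j))
--                 quota -= 1
--             nums[j] = quota
--     out = []
--     for i in range(height - 1, -1, -1):
--         for j in range(width):
--             c = arr[i][j]
--             if c != " " and (i, j) not in removed:
--                 out.append(c)
--     return "".join(out)
-- ===== Notes on version B (the rewrite author's own statement) =====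
-- stated objective: alternative
-- what changed: A makes one row-major pass mutating the grid and quotas while building the string; B first runs a column-major pass that collects each column's bottom-up non-space positions, marks the removed ones in a set and writes the leftover quota back, then a separate collection pass over the intact grid.
import Mathlib
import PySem

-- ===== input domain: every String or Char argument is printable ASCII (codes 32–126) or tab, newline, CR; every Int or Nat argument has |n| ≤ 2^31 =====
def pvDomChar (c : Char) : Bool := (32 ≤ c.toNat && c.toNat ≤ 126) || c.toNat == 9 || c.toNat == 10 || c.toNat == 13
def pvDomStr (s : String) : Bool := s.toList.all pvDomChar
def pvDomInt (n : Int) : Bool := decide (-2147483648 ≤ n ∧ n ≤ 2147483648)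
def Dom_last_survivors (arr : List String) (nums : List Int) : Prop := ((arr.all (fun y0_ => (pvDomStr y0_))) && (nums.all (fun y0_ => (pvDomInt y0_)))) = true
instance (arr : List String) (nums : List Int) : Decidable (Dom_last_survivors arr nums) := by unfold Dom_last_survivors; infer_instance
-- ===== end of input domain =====

-- B is an alternative decomposition (column-major removal pass building a 'removed' set, then a
-- collection pass), not faster; A mutates `nums` in place and B performs the same mutation — the
-- equivalence proved here is about the RETURN value.

-- ===== PORT A =====
-- One inner-loop step of A: state = (arr_separate[i] as list of Option Char, nums, result).
def pvACell (st : List (Option Char) × List Int × String) (j : Nat) :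
    List (Option Char) × List Int × String :=
  let row := st.1
  let nums := st.2.1
  let res := st.2.2
  -- if arr_separate[i][j] != " ": if nums[j] != 0: nums[j] -= 1; arr_separate[i][j] = None
  let p :=
    if row.getD j none ≠ some ' ' ∧ nums.getD j 0 ≠ 0 then
      (row.set j none, nums.set j (nums.getD j 0 - 1))
    else (row, nums)
  -- if arr_separate[i][j] != None and arr_separate[i][j] != " ": result += arr_separate[i][j]
  match p.1.getD j none with
  | some c => if c ≠ ' ' then (p.1, p.2, res.push c) else (p.1, p.2, res)
  | none => (p.1, p.2, res)

-- One outer-loop iteration of A (row i); the mutated row is local to the iteration.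
def pvARow (w : Nat) (row : List Char) (nums : List Int) (res : String) : List Int × String :=
  ((List.range w).foldl pvACell (row.map some, nums, res)).2

def last_survivors (arr : List String) (nums : List Int) : String :=
  ((List.range arr.length).reverse.foldl
    (fun (st : List Int × String) i =>
      pvARow (arr.headD "").toList.length (arr.getD i "").toList st.1 st.2)
    (nums, "")).2

-- ===== PORT B =====
-- B's inner removal loop over one column's bottom-up non-space row indices:
-- while the quota is nonzero, remove; on quota 0, break.
def pvBColLoop (j : Nat) : List Nat → PySem.Set (Nat × Nat) → Int → PySem.Set (Nat × Nat) × Int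
  | [], s, q => (s, q)
  | i :: rest, s, q =>
    if q = 0 then (s, q) else pvBColLoop j rest (PySem.Set.add s (i, j)) (q - 1)

-- One column of B's first pass; `nums[j]` is only read/written when the column has a non-space.
def pvBCol (arr : List String) (n : Nat) (st : PySem.Set (Nat × Nat) × List Int) (j : Nat) :
    PySem.Set (Nat × Nat) × List Int :=
  let col := (List.range n).reverse.filter (fun i => (arr.getD i "").toList.getD j ' ' ≠ ' ')
  if col ≠ [] then
    let inner := pvBColLoop j col st.1 (st.2.getD j 0)
    (inner.1, st.2.set j inner.2)
  else st

def last_survivors_alt (arr : List String) (nums : List Int) : String :=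
  let n := arr.length
  let w := (arr.headD "").toList.length    -- width = len(arr[0]) if arr else 0
  let removed := ((List.range w).foldl (pvBCol arr n) ((PySem.Set.ofList []), nums)).1
  let out := (List.range n).reverse.foldl (fun acc i =>
      (List.range w).foldl (fun acc2 j =>
        let c := (arr.getD i "").toList.getD j ' '
        if c ≠ ' ' ∧ (i, j) ∉ removed then acc2 ++ [c] else acc2) acc)
    ([] : List Char)
  String.ofList out

-- ===== PRECONDITION & SPEC =====
-- A raises IndexError exactly when a row is shorter than the first row (arr_separate[i][j]) or when
-- some column j containing a non-space letter has j ≥ len(nums) (the nums[j] access); Pre_ excludes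
-- exactly those raising inputs and nothing else.
def Pre_last_survivors (arr : List String) (nums : List Int) : Prop :=
  (∀ s ∈ arr, (arr.headD "").toList.length ≤ s.toList.length) ∧
    ∀ j < (arr.headD "").toList.length,
      (∃ i < arr.length, (arr.getD i "").toList.getD j ' ' ≠ ' ') → j < nums.length
instance (arr : List String) (nums : List Int) : Decidable (Pre_last_survivors arr nums) := by
  unfold Pre_last_survivors; infer_instance

def pvWitness_last_survivors : List String × List Int := (["ab", "c "], [1, 0])

def Spec_last_survivors (arr : List String) (nums : List Int) (out : String) : Prop := out = last_survivors_alt arr nums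
instance (arr : List String) (nums : List Int) (out : String) : Decidable (Spec_last_survivors arr nums out) := by unfold Spec_last_survivors; infer_instance

-- ===== CLAIM (what is proved, stated in full; the proofs are below) =====
def Claim_equal_last_survivors : Prop := ∀ (arr : List String) (nums : List Int), Dom_last_survivors arr nums → Pre_last_survivors arr nums → Spec_last_survivors arr nums (last_survivors arr nums)

-- ===== LEMMAS AND PROOFS =====

-- Row i of the grid, and the character at (i, j), as both ports read them.
def pvRow (arr : List String) (i : Nat) : List Char := (arr.getD i "").toList
def pvCell (arr : List String) (i j : Nat) : Char := (pvRow arr i).getD j ' '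

-- Per-column quota update produced by one row (bottom-up), restricted to j < w.
def pvQ (w : Nat) (row : List Char) (q : Nat → Int) : Nat → Int :=
  fun j => if j < w ∧ row.getD j ' ' ≠ ' ' ∧ q j ≠ 0 then q j - 1 else q j

-- Characters of one row that survive given current quotas q.
def pvRowOut (w : Nat) (row : List Char) (q : Nat → Int) : List Char :=
  ((List.range w).filter (fun j => decide (row.getD j ' ' ≠ ' ' ∧ q j = 0))).map
    (fun j => row.getD j ' ')

-- Reference recursion: rows listed bottom-up, threading quotas.
def pvS (w : Nat) : List (List Char) → (Nat → Int) → List Char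
  | [], _ => []
  | r :: rs, q => pvRowOut w r q ++ pvS w rs (pvQ w r q)

def pvQuotas (w : Nat) : List (List Char) → (Nat → Int) → (Nat → Int)
  | [], q => q
  | r :: rs, q => pvQuotas w rs (pvQ w r q)

-- Rows k-1, …, 0 (bottom-up order of the subgrid of the first k rows).
def pvRowsBU (arr : List String) (k : Nat) : List (List Char) :=
  (List.range k).reverse.map (pvRow arr)

-- Number of non-space cells in column j among rows i+1 … k-1.
def pvAboveK (arr : List String) (k i j : Nat) : Nat :=
  ((List.range k).filter (fun i' => decide (i < i' ∧ pvCell arr i' j ≠ ' '))).length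

-- Number of non-space cells in column j among rows k … n-1.
def pvFromK (arr : List String) (n k j : Nat) : Nat :=
  ((List.range n).filter (fun i' => decide (k ≤ i' ∧ pvCell arr i' j ≠ ' '))).length

-- Quota left after c removal opportunities starting from v (decrement while nonzero).
def pvApply (v : Int) (c : Nat) : Int := if 0 ≤ v then max (v - c) 0 else v - c

theorem pvRowsBU_succ (arr : List String) (k : Nat) :
    pvRowsBU arr (k + 1) = pvRow arr k :: pvRowsBU arr k := by
  simp [pvRowsBU, List.range_succ]

theorem pvAInner_spec (row : List Char) (nums : List Int) (res : String) :
    ∀ u, u ≤ row.length → (∀ j, j < u → row.getD j ' ' ≠ ' ' → j < nums.length) →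
    ((List.range u).foldl pvACell (row.map some, nums, res)).1.length = row.length ∧
    ((List.range u).foldl pvACell (row.map some, nums, res)).2.1.length = nums.length ∧
    (∀ k, u ≤ k →
      ((List.range u).foldl pvACell (row.map some, nums, res)).1.getD k none
        = (row.map some).getD k none) ∧
    (∀ k, u ≤ k →
      ((List.range u).foldl pvACell (row.map some, nums, res)).2.1.getD k 0 = nums.getD k 0) ∧
    (∀ k, k < u →
      ((List.range u).foldl pvACell (row.map some, nums, res)).2.1.getD k 0
        = pvQ u row (fun j => nums.getD j 0) k) ∧
    ((List.range u).foldl pvACell (row.map some, nums, res)).2.2.toList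
      = res.toList ++ pvRowOut u row (fun j => nums.getD j 0) := by
  intro u
  induction u with
  | zero =>
    intro _ _
    refine ⟨by simp, rfl, fun k _ => rfl, fun k _ => rfl, fun k hk => absurd hk (by omega), ?_⟩
    simp [pvRowOut]
  | succ u ih =>
    intro hr hcol
    obtain ⟨h0a, h0b, h1, h2, h3, h4⟩ := ih (by omega) (fun j hj => hcol j (by omega))
    rw [List.range_succ, List.foldl_append, List.foldl_cons, List.foldl_nil]
    set S := (List.range u).foldl pvACell (row.map some, nums, res) with hS
    have hu_row : u < row.length := by omega
    have hcell : S.1.getD u none = some (row.getD u ' ') := by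
      rw [h1 u le_rfl]
      simp [List.getD_eq_getElem?_getD, List.getElem?_eq_getElem hu_row]
    have hnum : S.2.1.getD u 0 = nums.getD u 0 := h2 u le_rfl
    have hQ : ∀ k, k < u →
        pvQ u row (fun j => nums.getD j 0) k = pvQ (u + 1) row (fun j => nums.getD j 0) k := by
      intro k hk
      simp only [pvQ]
      by_cases hX : row.getD k ' ' ≠ ' ' ∧ nums.getD k 0 ≠ 0
      · rw [if_pos ⟨hk, hX.1, hX.2⟩, if_pos ⟨by omega, hX.1, hX.2⟩]
      · rw [if_neg (by tauto), if_neg (by tauto)]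
    simp only [pvACell, hcell, hnum]
    by_cases hsp : row.getD u ' ' = ' '
    · -- space: nothing happens to the state, nothing appended
      have hsp' : row[u]?.getD ' ' = ' ' := by rw [← List.getD_eq_getElem?_getD]; exact hsp
      rw [if_neg (by simp [hsp, hsp'])]
      simp only [hcell]
      rw [if_neg (by simp [hsp, hsp'])]
      refine ⟨h0a, h0b, fun k hk => h1 k (by omega), fun k hk => h2 k (by omega), ?_, ?_⟩
      · intro k hk
        by_cases hku : k < u
        · rw [h3 k hku, hQ k hku]
        · have hke : k = u := by omega
          subst hke
          rw [hnum]
          simp only [pvQ]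
          rw [if_neg (by simp [hsp, hsp'])]
      · rw [h4]
        simp only [pvRowOut, List.range_succ, List.filter_append, List.map_append]
        rw [List.filter_cons]
        simp [hsp, hsp']
    · have hsp' : ¬ row[u]?.getD ' ' = ' ' := by rw [← List.getD_eq_getElem?_getD]; exact hsp
      have hun : u < nums.length := hcol u (by omega) hsp
      by_cases hz : nums.getD u 0 = 0
      · -- non-space, quota exhausted: survives (appended), state unchanged
        have hz' : nums[u]?.getD 0 = 0 := by rw [← List.getD_eq_getElem?_getD]; exact hz
        rw [if_neg (by simp [hz, hz'])]
        simp only [hcell]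
        rw [if_pos (by simp [hsp, hsp'])]
        refine ⟨h0a, h0b, fun k hk => h1 k (by omega), fun k hk => h2 k (by omega), ?_, ?_⟩
        · intro k hk
          by_cases hku : k < u
          · rw [h3 k hku, hQ k hku]
          · have hke : k = u := by omega
            subst hke
            rw [hnum]
            simp only [pvQ]
            rw [if_neg (by simp [hz, hz'])]
        · rw [String.toList_push, h4, List.append_assoc]
          simp only [pvRowOut, List.range_succ, List.filter_append, List.map_append]
          rw [List.filter_cons]
          simp [hsp, hsp', hz, hz']
      · -- non-space, quota available: removed (not appended), quota decremented
        have hz' : ¬ nums[u]?.getD 0 = 0 := by rw [← List.getD_eq_getElem?_getD]; exact hz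
        rw [if_pos ⟨by simp [hsp, hsp'], hz⟩]
        have hset : (S.1.set u none).getD u none = none := by
          simp [List.getD_eq_getElem?_getD, List.getElem?_set_self, h0a, hu_row]
        simp only [hset]
        refine ⟨by simpa using h0a, by simpa using h0b, ?_, ?_, ?_, ?_⟩
        · intro k hk
          rw [List.getD_eq_getElem?_getD, List.getElem?_set_ne (by omega), ← List.getD_eq_getElem?_getD]
          exact h1 k (by omega)
        · intro k hk
          rw [List.getD_eq_getElem?_getD, List.getElem?_set_ne (by omega), ← List.getD_eq_getElem?_getD]
          exact h2 k (by omega)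
        · intro k hk
          by_cases hku : k < u
          · rw [List.getD_eq_getElem?_getD, List.getElem?_set_ne (by omega), ← List.getD_eq_getElem?_getD,
              h3 k hku, hQ k hku]
          · have hke : k = u := by omega
            subst hke
            rw [List.getD_eq_getElem?_getD, List.getElem?_set_self (by omega)]
            simp only [Option.getD_some, pvQ]
            rw [if_pos ⟨by omega, hsp, hz⟩]
        · rw [h4]
          simp only [pvRowOut, List.range_succ, List.filter_append, List.map_append]
          rw [List.filter_cons]
          simp [hz, hz']

theorem pvARow_nums (w : Nat) (row : List Char) (nums : List Int) (res : String)
    (hrow : w ≤ row.length) (hcol : ∀ j, j < w → row.getD j ' ' ≠ ' ' → j < nums.length) :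
    ∀ j, (pvARow w row nums res).1.getD j 0 = pvQ w row (fun j => nums.getD j 0) j := by
  intro j
  rcases pvAInner_spec row nums res w hrow hcol with ⟨-, -, -, h2, h3, -⟩
  by_cases hj : j < w
  · exact h3 j hj
  · have := h2 j (by omega)
    simp only [pvARow, this, pvQ]
    simp [hj]

theorem pvARow_res (w : Nat) (row : List Char) (nums : List Int) (res : String)
    (hrow : w ≤ row.length) (hcol : ∀ j, j < w → row.getD j ' ' ≠ ' ' → j < nums.length) :
    (pvARow w row nums res).2.toList = res.toList ++ pvRowOut w row (fun j => nums.getD j 0) := by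
  exact (pvAInner_spec row nums res w hrow hcol).2.2.2.2.2

theorem pvARow_len (w : Nat) (row : List Char) (nums : List Int) (res : String)
    (hrow : w ≤ row.length) (hcol : ∀ j, j < w → row.getD j ' ' ≠ ' ' → j < nums.length) :
    (pvARow w row nums res).1.length = nums.length :=
  (pvAInner_spec row nums res w hrow hcol).2.1

theorem pvAFold_spec (arr : List String) (w : Nat) :
    ∀ k (nums : List Int) (res : String),
      (∀ i j, j < w → pvCell arr i j ≠ ' ' → j < nums.length) →
      (∀ i, i < k → w ≤ (pvRow arr i).length) →
      (∀ j, ((List.range k).reverse.foldl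
          (fun (st : List Int × String) i => pvARow w (pvRow arr i) st.1 st.2)
          (nums, res)).1.getD j 0
        = pvQuotas w (pvRowsBU arr k) (fun j => nums.getD j 0) j) ∧
      ((List.range k).reverse.foldl
          (fun (st : List Int × String) i => pvARow w (pvRow arr i) st.1 st.2)
          (nums, res)).2.toList
        = res.toList ++ pvS w (pvRowsBU arr k) (fun j => nums.getD j 0) := by
  intro k
  induction k with
  | zero =>
    intro nums res _ _
    exact ⟨fun j => rfl, by simp [pvRowsBU, pvS]⟩
  | succ k ih =>
    intro nums res hnums hrow
    have hrev : (List.range (k + 1)).reverse = k :: (List.range k).reverse := by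
      simp [List.range_succ]
    rw [hrev, List.foldl_cons]
    have hrowk : w ≤ (pvRow arr k).length := hrow k (by omega)
    have hcolk : ∀ j, j < w → (pvRow arr k).getD j ' ' ≠ ' ' → j < nums.length :=
      fun j hj hc => hnums k j hj hc
    have hN := pvARow_nums w (pvRow arr k) nums res hrowk hcolk
    have hR := pvARow_res w (pvRow arr k) nums res hrowk hcolk
    have hL := pvARow_len w (pvRow arr k) nums res hrowk hcolk
    have hfun : (fun j => (pvARow w (pvRow arr k) nums res).1.getD j 0)
        = pvQ w (pvRow arr k) (fun j => nums.getD j 0) := funext hN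
    rw [show pvARow w (pvRow arr k) (nums, res).1 (nums, res).2
        = ((pvARow w (pvRow arr k) nums res).1, (pvARow w (pvRow arr k) nums res).2) from rfl]
    obtain ⟨ha, hb⟩ := ih (pvARow w (pvRow arr k) nums res).1 (pvARow w (pvRow arr k) nums res).2
      (fun i j hj hc => by rw [hL]; exact hnums i j hj hc) (fun i hi => hrow i (by omega))
    constructor
    · intro j
      rw [ha j, pvRowsBU_succ]
      simp only [pvQuotas]
      rw [hfun]
    · rw [hb, hR, pvRowsBU_succ]
      simp only [pvS]
      rw [hfun, List.append_assoc]

theorem pvAboveK_succ (arr : List String) (k i j : Nat) :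
    pvAboveK arr (k + 1) i j
      = pvAboveK arr k i j + (if i < k ∧ pvCell arr k j ≠ ' ' then 1 else 0) := by
  simp only [pvAboveK, List.range_succ, List.filter_append, List.length_append]
  congr 1
  rw [List.filter_cons]
  split_ifs with h1 h2 h3 <;> simp_all

theorem pvAboveK_ge (arr : List String) (k i j : Nat) (h : k ≤ i) :
    pvAboveK arr k i j = 0 := by
  simp only [pvAboveK, List.length_eq_zero_iff]
  apply List.filter_eq_nil_iff.mpr
  intro i' hi'
  have := List.mem_range.mp hi'
  simp
  omega

-- A reference fold that processes every row of the column (no break), used as a bridge.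
def pvBColStep (arr : List String) (j : Nat) (st2 : PySem.Set (Nat × Nat) × Int) (i : Nat) :
    PySem.Set (Nat × Nat) × Int :=
  if (arr.getD i "").toList.getD j ' ' ≠ ' ' ∧ st2.2 ≠ 0 then
    (PySem.Set.add st2.1 (i, j), st2.2 - 1)
  else st2

theorem pvBColStep_fold_zero (arr : List String) (j : Nat) :
    ∀ (L : List Nat) (s : PySem.Set (Nat × Nat)),
      L.foldl (pvBColStep arr j) (s, 0) = (s, 0) := by
  intro L
  induction L with
  | nil => intro s; rfl
  | cons x xs ih =>
    intro s
    rw [List.foldl_cons]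
    have : pvBColStep arr j (s, 0) x = (s, 0) := by
      simp [pvBColStep]
    rw [this, ih]

-- B's break-loop over the filtered column equals the no-break reference fold.
theorem pvBColLoop_eq_fold (arr : List String) (j : Nat) :
    ∀ k (s : PySem.Set (Nat × Nat)) (q : Int),
      pvBColLoop j
        ((List.range k).reverse.filter (fun i => (arr.getD i "").toList.getD j ' ' ≠ ' ')) s q
      = (List.range k).reverse.foldl (pvBColStep arr j) (s, q) := by
  intro k
  induction k with
  | zero => intro s q; rfl
  | succ k ih =>
    intro s q
    have hrev : (List.range (k + 1)).reverse = k :: (List.range k).reverse := by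
      simp [List.range_succ]
    rw [hrev, List.filter_cons, List.foldl_cons]
    by_cases hc : (arr.getD k "").toList.getD j ' ' = ' '
    · have hc' : (arr[k]?.getD "").toList[j]?.getD ' ' = ' ' := by
        simpa [List.getD_eq_getElem?_getD] using hc
      rw [if_neg (by simp [hc'])]
      have : pvBColStep arr j (s, q) k = (s, q) := by
        simp [pvBColStep, hc, hc']
      rw [this, ih]
    · have hc' : ¬ (arr[k]?.getD "").toList[j]?.getD ' ' = ' ' := by
        simpa [List.getD_eq_getElem?_getD] using hc
      rw [if_pos (by simp [hc'])]
      by_cases hq : q = 0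
      · subst hq
        simp only [pvBColLoop]
        rw [if_pos trivial]
        have : pvBColStep arr j (s, 0) k = (s, 0) := by
          simp [pvBColStep]
        rw [this, pvBColStep_fold_zero]
      · simp only [pvBColLoop]
        rw [if_neg hq]
        have : pvBColStep arr j (s, q) k = (PySem.Set.add s (k, j), q - 1) := by
          simp [pvBColStep, hc, hc', hq]
        rw [this, ih]

theorem pvBColFold_mem (arr : List String) (j : Nat) :
    ∀ k (s : PySem.Set (Nat × Nat)) (qv : Int) (p : Nat × Nat),
      p ∈ ((List.range k).reverse.foldl (pvBColStep arr j) (s, qv)).1 ↔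
        p ∈ s ∨ (p.2 = j ∧ p.1 < k ∧ pvCell arr p.1 j ≠ ' ' ∧
          (qv < 0 ∨ (pvAboveK arr k p.1 j : Int) < qv)) := by
  intro k
  induction k with
  | zero => intro s qv p; simp
  | succ k ih =>
    intro s qv p
    have hrev : (List.range (k + 1)).reverse = k :: (List.range k).reverse := by
      simp [List.range_succ]
    rw [hrev, List.foldl_cons]
    simp only [pvBColStep]
    by_cases hc : pvCell arr k j ≠ ' ' ∧ qv ≠ 0
    · rw [if_pos (by exact ⟨hc.1, hc.2⟩)]
      rw [ih (PySem.Set.add s (k, j)) (qv - 1) p]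
      rw [PySem.Set.mem_add]
      obtain ⟨hck, hq⟩ := hc
      constructor
      · rintro (⟨hs | hpk⟩ | ⟨hpj, hpk, hcp, hcond⟩)
        · exact Or.inl hs
        · refine Or.inr ?_
          rw [hpk]
          refine ⟨rfl, by omega, hck, ?_⟩
          rw [pvAboveK_succ, pvAboveK_ge arr k k j le_rfl]
          simp
          omega
        · refine Or.inr ⟨hpj, by omega, hcp, ?_⟩
          rw [pvAboveK_succ]
          rw [if_pos ⟨hpk, hck⟩]
          push_cast
          omega
      · rintro (hs | ⟨hpj, hpk, hcp, hcond⟩)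
        · exact Or.inl (Or.inl hs)
        · by_cases hpk' : p.1 < k
          · refine Or.inr ⟨hpj, hpk', hcp, ?_⟩
            rw [pvAboveK_succ, if_pos ⟨hpk', hck⟩] at hcond
            push_cast at hcond
            omega
          · have hpe : p.1 = k := by omega
            refine Or.inl (Or.inr ?_)
            have : p = (p.1, p.2) := rfl
            rw [this, hpe, hpj]
    · rw [if_neg (by tauto)]
      rw [ih s qv p]
      constructor
      · rintro (hs | ⟨hpj, hpk, hcp, hcond⟩)
        · exact Or.inl hs
        · have hsplit : pvCell arr k j = ' ' ∨ qv = 0 := by tauto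
          refine Or.inr ⟨hpj, by omega, hcp, ?_⟩
          rcases hsplit with hck | hq0
          · rw [pvAboveK_succ, if_neg (by tauto)]
            simpa using hcond
          · exfalso
            have hnn : 0 ≤ (pvAboveK arr k p.1 j : Int) := by positivity
            omega
      · rintro (hs | ⟨hpj, hpk, hcp, hcond⟩)
        · exact Or.inl hs
        · have hsplit : pvCell arr k j = ' ' ∨ qv = 0 := by tauto
          rcases hsplit with hck | hq0
          · have hpk' : p.1 < k := by
              rcases Nat.lt_succ_iff_lt_or_eq.mp hpk with h | h
              · exact h
              · exact absurd (h ▸ hcp) (by simp [hck])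
            refine Or.inr ⟨hpj, hpk', hcp, ?_⟩
            rw [pvAboveK_succ, if_neg (by tauto)] at hcond
            simpa using hcond
          · exfalso
            have hnn : 0 ≤ (pvAboveK arr (k + 1) p.1 j : Int) := by positivity
            omega

theorem pvPass1_spec (arr : List String) (nums : List Int) (n : Nat) :
    ∀ u,
      (∀ k, u ≤ k →
        ((List.range u).foldl (pvBCol arr n) (PySem.Set.ofList [], nums)).2.getD k 0
          = nums.getD k 0) ∧
      (∀ p : Nat × Nat,
        p ∈ ((List.range u).foldl (pvBCol arr n) (PySem.Set.ofList [], nums)).1 ↔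
          p.2 < u ∧ p.1 < n ∧ pvCell arr p.1 p.2 ≠ ' ' ∧
            (nums.getD p.2 0 < 0 ∨ (pvAboveK arr n p.1 p.2 : Int) < nums.getD p.2 0)) := by
  intro u
  induction u with
  | zero =>
    refine ⟨fun k _ => rfl, fun p => ?_⟩
    simp [PySem.Set.ofList]
  | succ u ih =>
    obtain ⟨ha, hb⟩ := ih
    rw [List.range_succ, List.foldl_append, List.foldl_cons, List.foldl_nil]
    set F := (List.range u).foldl (pvBCol arr n) (PySem.Set.ofList [], nums) with hF
    simp only [pvBCol]
    by_cases hcol : (List.range n).reverse.filter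
        (fun i => (arr.getD i "").toList.getD u ' ' ≠ ' ') = []
    · rw [if_neg (by simpa using hcol)]
      have hnone : ∀ i, i < n → ¬ pvCell arr i u ≠ ' ' := by
        intro i hi hne
        have : i ∈ (List.range n).reverse.filter
            (fun i => (arr.getD i "").toList.getD u ' ' ≠ ' ') := by
          rw [List.mem_filter]
          exact ⟨by simp [hi], by simpa [pvCell, pvRow] using hne⟩
        rw [hcol] at this
        exact absurd this (List.not_mem_nil)
      refine ⟨fun k hk => ha k (by omega), fun p => ?_⟩
      rw [hb p]
      constructor
      · rintro ⟨h1, h⟩; exact ⟨by omega, h⟩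
      · rintro ⟨h1, h2, h3, h4⟩
        by_cases hpu : p.2 < u
        · exact ⟨hpu, h2, h3, h4⟩
        · have hpe : p.2 = u := by omega
          rw [hpe] at h3
          exact absurd h3 (hnone p.1 h2)
    · rw [if_pos (by simpa using hcol)]
      rw [pvBColLoop_eq_fold arr u n F.1 (F.2.getD u 0)]
      constructor
      · intro k hk
        rw [List.getD_eq_getElem?_getD, List.getElem?_set_ne (by omega), ← List.getD_eq_getElem?_getD]
        exact ha k (by omega)
      · rintro ⟨p1, p2⟩
        rw [pvBColFold_mem arr u n F.1 (F.2.getD u 0) (p1, p2), hb (p1, p2), ha u le_rfl]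
        simp only
        constructor
        · rintro (⟨hpu, hrest⟩ | ⟨hpj, hrest⟩)
          · exact ⟨by omega, hrest⟩
          · subst hpj
            exact ⟨by omega, hrest⟩
        · rintro ⟨hpu, hrest⟩
          by_cases hpju : p2 < u
          · exact Or.inl ⟨hpju, hrest⟩
          · have hpe : p2 = u := by omega
            subst hpe
            exact Or.inr ⟨rfl, hrest⟩

theorem pvApply_eq_zero_iff (v : Int) (c : Nat) :
    pvApply v c = 0 ↔ 0 ≤ v ∧ v ≤ (c : Int) := by
  simp only [pvApply]
  split_ifs with h <;> omega

theorem pvAboveK_eq_pvFromK (arr : List String) (n k j : Nat) :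
    pvAboveK arr n k j = pvFromK arr n (k + 1) j := by
  rfl

theorem pvFromK_eq (arr : List String) (n k j : Nat) :
    pvFromK arr n k j
      = pvAboveK arr n k j + (if k < n ∧ pvCell arr k j ≠ ' ' then 1 else 0) := by
  induction n with
  | zero =>
    simp [pvFromK, pvAboveK]
  | succ n ihn =>
    have hf : pvFromK arr (n + 1) k j
        = pvFromK arr n k j + (if k ≤ n ∧ pvCell arr n j ≠ ' ' then 1 else 0) := by
      simp only [pvFromK, List.range_succ, List.filter_append, List.length_append]
      congr 1
      rw [List.filter_cons]
      split_ifs with h1 h2 h3 <;> simp_all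
    rw [hf, pvAboveK_succ arr n k j, ihn]
    rcases Nat.lt_trichotomy k n with hkn | hkn | hkn
    · have e2 : (if k ≤ n ∧ pvCell arr n j ≠ ' ' then 1 else 0)
          = (if k < n ∧ pvCell arr n j ≠ ' ' then 1 else 0) := by
        by_cases hc : pvCell arr n j = ' '
        · simp [hc]
        · rw [if_pos ⟨by omega, hc⟩, if_pos ⟨hkn, hc⟩]
      have e4 : (if k < n + 1 ∧ pvCell arr k j ≠ ' ' then 1 else 0)
          = (if k < n ∧ pvCell arr k j ≠ ' ' then 1 else 0) := by
        by_cases hc : pvCell arr k j = ' '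
        · simp [hc]
        · rw [if_pos ⟨by omega, hc⟩, if_pos ⟨hkn, hc⟩]
      rw [e2, e4]
      omega
    · subst hkn
      have e1 : (if k < k ∧ pvCell arr k j ≠ ' ' then 1 else 0) = 0 := by simp
      have e2 : (if k ≤ k ∧ pvCell arr k j ≠ ' ' then 1 else 0)
          = (if k < k + 1 ∧ pvCell arr k j ≠ ' ' then 1 else 0) := by
        by_cases hc : pvCell arr k j = ' '
        · simp [hc]
        · rw [if_pos ⟨le_rfl, hc⟩, if_pos ⟨by omega, hc⟩]
      rw [e1, e2]
    · have e1 : (if k < n ∧ pvCell arr n j ≠ ' ' then 1 else 0) = 0 := by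
        rw [if_neg]; rintro ⟨h, -⟩; omega
      have e2 : (if k ≤ n ∧ pvCell arr n j ≠ ' ' then 1 else 0) = 0 := by
        rw [if_neg]; rintro ⟨h, -⟩; omega
      have e3 : (if k < n ∧ pvCell arr k j ≠ ' ' then 1 else 0) = 0 := by
        rw [if_neg]; rintro ⟨h, -⟩; omega
      have e4 : (if k < n + 1 ∧ pvCell arr k j ≠ ' ' then 1 else 0) = 0 := by
        rw [if_neg]; rintro ⟨h, -⟩; omega
      rw [e1, e2, e3, e4]

-- The reference recursion, when fed quotas of the form pvApply (v j) (pvFromK n k j),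
-- equals the filter by the closed-form removal condition.
theorem pvS_closed (arr : List String) (w n : Nat) (v : Nat → Int) :
    ∀ k (q : Nat → Int), k ≤ n → (∀ j, j < w → q j = pvApply (v j) (pvFromK arr n k j)) →
      pvS w (pvRowsBU arr k) q
        = (List.range k).reverse.flatMap (fun i =>
            ((List.range w).filter (fun j => decide (pvCell arr i j ≠ ' ' ∧
              ¬(v j < 0 ∨ (pvAboveK arr n i j : Int) < v j)))).map (fun j => pvCell arr i j)) := by
  intro k
  induction k with
  | zero =>
    intro q _ _
    simp [pvRowsBU, pvS]
  | succ k ih =>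
    intro q hkn hq
    have hrev : (List.range (k + 1)).reverse = k :: (List.range k).reverse := by
      simp [List.range_succ]
    rw [pvRowsBU_succ, hrev]
    simp only [pvS, List.flatMap_cons]
    have hfk : ∀ j, pvFromK arr n k j
        = pvFromK arr n (k + 1) j + (if pvCell arr k j ≠ ' ' then 1 else 0) := by
      intro j
      rw [pvFromK_eq, pvAboveK_eq_pvFromK]
      have hk : k < n := by omega
      by_cases hc : pvCell arr k j = ' ' <;> simp [hc, hk]
    congr 1
    · -- the surviving characters of row k
      simp only [pvRowOut, pvCell]
      refine congrArg _ (List.filter_congr ?_)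
      intro j hj
      have hjw : j < w := List.mem_range.mp hj
      rw [hq j hjw]
      apply decide_eq_decide.mpr
      rw [pvAboveK_eq_pvFromK]
      constructor
      · rintro ⟨hc, hz⟩
        rw [pvApply_eq_zero_iff] at hz
        exact ⟨hc, by omega⟩
      · rintro ⟨hc, hz⟩
        refine ⟨hc, ?_⟩
        rw [pvApply_eq_zero_iff]
        omega
    · -- the remaining rows, with the updated quotas
      apply ih (pvQ w (pvRow arr k) q) (by omega)
      intro j hjw
      simp only [pvQ]
      rw [hq j hjw, hfk j]
      by_cases hc : pvCell arr k j = ' '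
      · have hC0 : (if pvCell arr k j ≠ ' ' then 1 else 0) = 0 := by simp [hc]
        rw [hC0, if_neg]
        · norm_num
        · exact fun h => h.2.1 hc
      · have hC1 : (if pvCell arr k j ≠ ' ' then 1 else 0) = 1 := by simp [hc]
        rw [hC1]
        by_cases hz : pvApply (v j) (pvFromK arr n (k + 1) j) = 0
        · rw [if_neg (by rintro ⟨-, -, h⟩; exact h hz)]
          simp only [pvApply] at hz ⊢
          split_ifs at hz ⊢ <;> push_cast at hz ⊢ <;> omega
        · rw [if_pos ⟨hjw, hc, hz⟩]
          simp only [pvApply] at hz ⊢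
          split_ifs at hz ⊢ <;> push_cast at hz ⊢ <;> omega

-- ===== VERDICT (by name: the statement is the Claim_ definition above) =====
theorem last_survivors_spec : Claim_equal_last_survivors := by
  intro arr nums _dom pre
  unfold Spec_last_survivors
  obtain ⟨hrows, hnumsP⟩ := pre
  set w := (arr.headD "").toList.length with hw
  set n := arr.length with hn
  have hrow : ∀ i, i < n → w ≤ (pvRow arr i).length := by
    intro i hi
    have hmem : arr.getD i "" ∈ arr := by
      rw [List.getD_eq_getElem _ _ hi]; exact List.getElem_mem hi
    exact hrows _ hmem
  have hcol : ∀ i j, j < w → pvCell arr i j ≠ ' ' → j < nums.length := by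
    intro i j hj hc
    by_cases hi : i < n
    · exact hnumsP j hj ⟨i, hi, by simpa [pvCell, pvRow] using hc⟩
    · exfalso
      have hdef : arr.getD i "" = "" := List.getD_eq_default _ _ (by omega)
      refine hc ?_
      have hn2 : arr[i]? = none := List.getElem?_eq_none (by omega)
      simp [pvCell, pvRow, List.getD_eq_getElem?_getD, hn2]
  -- A side
  have hA : (last_survivors arr nums).toList = pvS w (pvRowsBU arr n) (fun j => nums.getD j 0) := by
    have h := (pvAFold_spec arr w n nums "" hcol hrow).2
    rw [show last_survivors arr nums
        = ((List.range n).reverse.foldl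
            (fun (st : List Int × String) i => pvARow w (pvRow arr i) st.1 st.2) (nums, "")).2
      from rfl]
    simpa using h
  -- B side
  have hB : (last_survivors_alt arr nums).toList
      = (List.range n).reverse.flatMap (fun i =>
          ((List.range w).filter (fun j => decide (pvCell arr i j ≠ ' ' ∧
            ¬(nums.getD j 0 < 0 ∨ (pvAboveK arr n i j : Int) < nums.getD j 0)))).map
            (fun j => pvCell arr i j)) := by
    have hmem := (pvPass1_spec arr nums n w).2
    rw [show last_survivors_alt arr nums
        = String.ofList ((List.range n).reverse.foldl (fun acc i =>
            (List.range w).foldl (fun acc2 j =>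
              if (arr.getD i "").toList.getD j ' ' ≠ ' ' ∧
                  (i, j) ∉ ((List.range w).foldl (pvBCol arr n) ((PySem.Set.ofList []), nums)).1
                then acc2 ++ [(arr.getD i "").toList.getD j ' '] else acc2) acc)
          ([] : List Char))
      from rfl, String.toList_ofList]
    have hout : ∀ (i : Nat) (acc : List Char),
        (List.range w).foldl (fun acc2 j =>
            if (arr.getD i "").toList.getD j ' ' ≠ ' ' ∧
                (i, j) ∉ ((List.range w).foldl (pvBCol arr n) (PySem.Set.ofList [], nums)).1
              then acc2 ++ [(arr.getD i "").toList.getD j ' '] else acc2) acc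
          = acc ++ ((List.range w).filter (fun j => decide (pvCell arr i j ≠ ' ' ∧
              ¬(nums.getD j 0 < 0 ∨ (pvAboveK arr n i j : Int) < nums.getD j 0)))).map
              (fun j => pvCell arr i j) := by
      intro i acc
      rw [PySem.List.foldl_append_ite
        (fun j => (arr.getD i "").toList.getD j ' ' ≠ ' ' ∧
          (i, j) ∉ ((List.range w).foldl (pvBCol arr n) (PySem.Set.ofList [], nums)).1)
        (fun j => (arr.getD i "").toList.getD j ' ')]
      simp only [pvCell, pvRow]
      congr 1
      refine congrArg _ (List.filter_congr ?_)
      intro j hj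
      have hjw : j < w := List.mem_range.mp hj
      simp only [decide_eq_decide]
      by_cases hin : i < n
      · rw [hmem (i, j)]
        simp only [pvCell, pvRow]
        by_cases hc : (arr.getD i "").toList.getD j ' ' = ' '
        · constructor <;> (rintro ⟨hne, -⟩; exact absurd hc hne)
        · constructor
          · rintro ⟨-, hnot⟩
            exact ⟨hc, fun hbad => hnot ⟨hjw, hin, hc, hbad⟩⟩
          · rintro ⟨-, hnot⟩
            exact ⟨hc, fun hh => hnot hh.2.2.2⟩
      · -- row i is out of range: the cell is the default ' ' and both sides are false
        have hdef : arr.getD i "" = "" := List.getD_eq_default _ _ (by omega)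
        have h0 : (arr.getD i "").toList.getD j ' ' = ' ' := by rw [hdef]; rfl
        constructor <;> (rintro ⟨hne, -⟩; exact absurd h0 hne)
    have h2 : ∀ (L : List Nat) (acc : List Char),
        L.foldl (fun acc i =>
          (List.range w).foldl (fun acc2 j =>
            if (arr.getD i "").toList.getD j ' ' ≠ ' ' ∧
                (i, j) ∉ ((List.range w).foldl (pvBCol arr n) (PySem.Set.ofList [], nums)).1
              then acc2 ++ [(arr.getD i "").toList.getD j ' '] else acc2) acc) acc
        = acc ++ L.flatMap (fun i =>
            ((List.range w).filter (fun j => decide (pvCell arr i j ≠ ' ' ∧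
              ¬(nums.getD j 0 < 0 ∨ (pvAboveK arr n i j : Int) < nums.getD j 0)))).map
              (fun j => pvCell arr i j)) := by
      intro L
      induction L with
      | nil => simp
      | cons x xs ih =>
        intro acc
        simp only [List.foldl_cons, List.flatMap_cons]
        rw [hout x acc, ih, List.append_assoc]
    rw [h2 (List.range n).reverse [], List.nil_append]
  -- bridge
  have hS : pvS w (pvRowsBU arr n) (fun j => nums.getD j 0)
      = (List.range n).reverse.flatMap (fun i =>
          ((List.range w).filter (fun j => decide (pvCell arr i j ≠ ' ' ∧
            ¬(nums.getD j 0 < 0 ∨ (pvAboveK arr n i j : Int) < nums.getD j 0)))).map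
            (fun j => pvCell arr i j)) := by
    apply pvS_closed arr w n (fun j => nums.getD j 0) n _ le_rfl
    intro j _
    have h0 : pvFromK arr n n j = 0 := by
      simp only [pvFromK, List.length_eq_zero_iff]
      apply List.filter_eq_nil_iff.mpr
      intro i' hi'
      have := List.mem_range.mp hi'
      simp; omega
    rw [h0]
    simp only [pvApply]
    split_ifs <;> omega
  apply String.toList_inj.mp
  rw [hA, hB, hS]
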